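-- pv_equiv track=rewrite | github.com/chanukyachintada06/psb-quantum-security-scanner | backend/engine/recommendation_engine.py | analyze_findings
-- ===== SOURCE A (Python) =====
-- from typing import List, Dict, Any
--
-- def analyze_findings(tls_results: List[Dict[str, Any]], risk_profile: Dict[str, Any]) -> List[Dict[str, str]]:
--     """
--     Generate misconfigurations and recommendations based on the aggregated TLS data.
--     Returns a list of finding objects ready for database insertion.
--     """
--     findings = []
--
--     if not tls_results:
--         findings.append({
--             "type": "MISCONFIG",
--             "severity": "CRITICAL",
--             "title": "Unreachable Target",
--             "description": "No successful TLS connections could be established to any resolved IP address."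
--         })
--         return findings
--
--     worst_tls_version = "TLS 1.3"
--     worst_key_type = "PQC"
--     has_static_rsa = False
--     has_weak_chain = False
--
--     for res in tls_results:
--         tls = res.get("tls", {})
--         cert = res.get("certificate", {})
--
--         tv = tls.get("version", "TLS 1.3")
--         if tv in ["TLS 1.0", "TLS 1.1"]:
--             worst_tls_version = tv
--         elif tv == "TLS 1.2" and worst_tls_version == "TLS 1.3":
--             worst_tls_version = tv
--
--         ke = tls.get("key_exchange", "")
--         if "Static" in ke:
--              has_static_rsa = True
--
--         if tls.get("public_key_type") in ["RSA", "ECDSA", "DSA"]: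
--              worst_key_type = "CLASSICAL"
--
--         if cert.get("chain_status") in ["WEAK", "UNTRUSTED"]:
--              has_weak_chain = True
--
--     # Misconfigurations
--     if worst_tls_version in ["TLS 1.0", "TLS 1.1"]:
--         findings.append({
--             "type": "MISCONFIG",
--             "severity": "HIGH",
--             "title": "Deprecated TLS Version",
--             "description": f"The target supports {worst_tls_version}, which is deprecated and vulnerable to legacy cryptographic attacks."
--         })
--         findings.append({
--             "type": "RECOMMENDATION",
--             "severity": "HIGH",
--             "title": "Upgrade to TLS 1.3",
--             "description": "Disable support for TLS 1.0/1.1 and prioritize TLS 1.3 with strong cipher suites."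
--         })
--
--     if has_static_rsa:
--         findings.append({
--             "type": "MISCONFIG",
--             "severity": "CRITICAL",
--             "title": "Missing Forward Secrecy",
--             "description": "Static RSA key exchange detected. This severely increases Harvest Now, Decrypt Later (HNDL) risk against future quantum computers."
--         })
--         findings.append({
--             "type": "RECOMMENDATION",
--             "severity": "CRITICAL",
--             "title": "Enable ECDHE or DHE",
--             "description": "Reconfigure the server to only allow ephemeral Diffie-Hellman key exchanges to guarantee perfect forward secrecy."
--         })
--
--     if has_weak_chain:
--         findings.append({
--             "type": "MISCONFIG",
--             "severity": "HIGH",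
--             "title": "Weak or Untrusted Certificate Chain",
--             "description": "The certificate chain contains untrusted roots or relies on weak legacy signing algorithms (e.g., SHA-1)."
--         })
--         findings.append({
--             "type": "RECOMMENDATION",
--             "severity": "HIGH",
--             "title": "Renew Certificate Chain",
--             "description": "Replace the existing certificate with one issued by a trusted CA using SHA-256 or better."
--         })
--
--     if risk_profile.get("crypto_mode") == "CLASSICAL":
--         findings.append({
--             "type": "RECOMMENDATION",
--             "severity": "MEDIUM",
--             "title": "Prepare PQC Migration Strategy",
--             "description": f"The cryptography relies purely on classical algorithms. Based on key sizes, risk horizon is ~{risk_profile.get('quantum_risk_horizon')}. Begin planning a transition to NIST-standardized PQC algorithms (e.g., FIPS 203 ML-KEM)."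
--         })
--
--     return findings
-- ===== SOURCE B (Python) =====
-- def _finding(ftype, severity, title, description):
--     return {"type": ftype, "severity": severity, "title": title,
--             "description": description}
--
--
-- def analyze_findings(tls_results, risk_profile):
--     """Rule-table re-implementation: independent scans compute the flags
--     (last legacy version via a reversed scan, any() for the booleans), and
--     findings are emitted by flattening a data table of (condition, findings)."""
--     if not tls_results:
--         return [_finding(
--             "MISCONFIG", "CRITICAL", "Unreachable Target",
--             "No successful TLS connections could be established to any resolved IP address.")]
--
--     versions = [res.get("tls", {}).get("version", "TLS 1.3") for res in tls_results]
--     # last-wins, as A's left-to-right overwrite dictates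
--     worst = next((v for v in reversed(versions) if v in ("TLS 1.0", "TLS 1.1")),
--                  "TLS 1.2" if "TLS 1.2" in versions else "TLS 1.3")
--
--     has_static_rsa = any("Static" in res.get("tls", {}).get("key_exchange", "")
--                          for res in tls_results)
--     has_weak_chain = any(res.get("certificate", {}).get("chain_status") in ("WEAK", "UNTRUSTED")
--                          for res in tls_results)
--
--     rules = [
--         (worst in ("TLS 1.0", "TLS 1.1"), [
--             _finding("MISCONFIG", "HIGH", "Deprecated TLS Version",
--                      f"The target supports {worst}, which is deprecated and vulnerable to legacy cryptographic attacks."),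
--             _finding("RECOMMENDATION", "HIGH", "Upgrade to TLS 1.3",
--                      "Disable support for TLS 1.0/1.1 and prioritize TLS 1.3 with strong cipher suites."),
--         ]),
--         (has_static_rsa, [
--             _finding("MISCONFIG", "CRITICAL", "Missing Forward Secrecy",
--                      "Static RSA key exchange detected. This severely increases Harvest Now, Decrypt Later (HNDL) risk against future quantum computers."),
--             _finding("RECOMMENDATION", "CRITICAL", "Enable ECDHE or DHE",
--                      "Reconfigure the server to only allow ephemeral Diffie-Hellman key exchanges to guarantee perfect forward secrecy."),
--         ]),
--         (has_weak_chain, [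
--             _finding("MISCONFIG", "HIGH", "Weak or Untrusted Certificate Chain",
--                      "The certificate chain contains untrusted roots or relies on weak legacy signing algorithms (e.g., SHA-1)."),
--             _finding("RECOMMENDATION", "HIGH", "Renew Certificate Chain",
--                      "Replace the existing certificate with one issued by a trusted CA using SHA-256 or better."),
--         ]),
--         (risk_profile.get("crypto_mode") == "CLASSICAL", [
--             _finding("RECOMMENDATION", "MEDIUM", "Prepare PQC Migration Strategy",
--                      f"The cryptography relies purely on classical algorithms. Based on key sizes, risk horizon is ~{risk_profile.get('quantum_risk_horizon')}. Begin planning a transition to NIST-standardized PQC algorithms (e.g., FIPS 203 ML-KEM)."),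
--         ]),
--     ]
--     return [f for cond, fs in rules if cond for f in fs]
-- ===== Notes on version B (the rewrite author's own statement) =====
-- stated objective: alternative
-- what changed: Replaced the single stateful loop (four mutable accumulators plus a dead worst_key_type) and the sequential append-blocks with independent scans (last legacy version via a reversed scan, any() flags) feeding a declarative (condition, findings) rule table, built from a finding() constructor, that is flattened into the result.
import Mathlib
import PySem

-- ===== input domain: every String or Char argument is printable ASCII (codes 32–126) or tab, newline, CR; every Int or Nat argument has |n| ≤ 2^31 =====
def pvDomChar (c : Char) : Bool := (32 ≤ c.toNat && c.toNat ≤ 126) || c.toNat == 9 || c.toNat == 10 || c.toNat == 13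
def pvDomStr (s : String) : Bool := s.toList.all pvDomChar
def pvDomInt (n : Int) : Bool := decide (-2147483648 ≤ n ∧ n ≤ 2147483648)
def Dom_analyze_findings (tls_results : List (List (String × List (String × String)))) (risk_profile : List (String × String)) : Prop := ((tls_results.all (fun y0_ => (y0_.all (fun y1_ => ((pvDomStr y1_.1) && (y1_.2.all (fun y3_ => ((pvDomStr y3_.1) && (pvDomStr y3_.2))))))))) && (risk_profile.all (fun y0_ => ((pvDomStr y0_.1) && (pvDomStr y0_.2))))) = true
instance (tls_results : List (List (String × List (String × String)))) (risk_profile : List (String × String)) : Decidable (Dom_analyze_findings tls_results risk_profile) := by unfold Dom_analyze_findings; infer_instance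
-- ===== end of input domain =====

-- B restructures A's single stateful loop into independent scans (a reversed scan for the
-- last legacy version, any() for the flags) feeding a declarative (condition, findings)
-- rule table built with a finding constructor; objective: alternative decomposition, same O(n).

-- ===== PORT A =====
-- A-side helpers (named extractions of A's inline expressions; first-match dict lookup)
def aTls (res : List (String × List (String × String))) : List (String × String) :=
  (List.lookup "tls" res).getD []
def aVer (res : List (String × List (String × String))) : String :=
  (List.lookup "version" (aTls res)).getD "TLS 1.3"
def aLeg (v : String) : Bool := v == "TLS 1.0" || v == "TLS 1.1"
def aStatic (res : List (String × List (String × String))) : Bool :=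
  PySem.Str.isIn "Static" ((List.lookup "key_exchange" (aTls res)).getD "")
def aPk (res : List (String × List (String × String))) : Bool :=
  let pk := List.lookup "public_key_type" (aTls res)
  pk == some "RSA" || pk == some "ECDSA" || pk == some "DSA"
def aChain (res : List (String × List (String × String))) : Bool :=
  let cs := List.lookup "chain_status" ((List.lookup "certificate" res).getD [])
  cs == some "WEAK" || cs == some "UNTRUSTED"

-- A's loop body: state (worst_tls_version, worst_key_type, has_static_rsa, has_weak_chain)
def aStep (st : String × String × Bool × Bool)
    (res : List (String × List (String × String))) : String × String × Bool × Bool :=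
  let tv := aVer res
  let w := if aLeg tv then tv
           else if tv == "TLS 1.2" && st.1 == "TLS 1.3" then tv else st.1
  let s := if aStatic res then true else st.2.2.1
  let k := if aPk res then "CLASSICAL" else st.2.1
  let c := if aChain res then true else st.2.2.2
  (w, k, s, c)

def analyze_findings (tls_results : List (List (String × List (String × String)))) (risk_profile : List (String × String)) : List (List (String × String)) :=
  let findings : List (List (String × String)) := []
  if tls_results = [] then
    findings ++ [[("type","MISCONFIG"),("severity","CRITICAL"),("title","Unreachable Target"),
      ("description","No successful TLS connections could be established to any resolved IP address.")]]
  else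
    let st := tls_results.foldl aStep ("TLS 1.3", "PQC", false, false)
    let worst := st.1
    let has_static_rsa := st.2.2.1
    let has_weak_chain := st.2.2.2
    let findings := if aLeg worst then
      (findings ++ [[("type","MISCONFIG"),("severity","HIGH"),("title","Deprecated TLS Version"),
        ("description","The target supports " ++ worst ++ ", which is deprecated and vulnerable to legacy cryptographic attacks.")]])
      ++ [[("type","RECOMMENDATION"),("severity","HIGH"),("title","Upgrade to TLS 1.3"),
        ("description","Disable support for TLS 1.0/1.1 and prioritize TLS 1.3 with strong cipher suites.")]]
      else findings
    let findings := if has_static_rsa then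
      (findings ++ [[("type","MISCONFIG"),("severity","CRITICAL"),("title","Missing Forward Secrecy"),
        ("description","Static RSA key exchange detected. This severely increases Harvest Now, Decrypt Later (HNDL) risk against future quantum computers.")]])
      ++ [[("type","RECOMMENDATION"),("severity","CRITICAL"),("title","Enable ECDHE or DHE"),
        ("description","Reconfigure the server to only allow ephemeral Diffie-Hellman key exchanges to guarantee perfect forward secrecy.")]]
      else findings
    let findings := if has_weak_chain then
      (findings ++ [[("type","MISCONFIG"),("severity","HIGH"),("title","Weak or Untrusted Certificate Chain"),
        ("description","The certificate chain contains untrusted roots or relies on weak legacy signing algorithms (e.g., SHA-1).")]])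
      ++ [[("type","RECOMMENDATION"),("severity","HIGH"),("title","Renew Certificate Chain"),
        ("description","Replace the existing certificate with one issued by a trusted CA using SHA-256 or better.")]]
      else findings
    let findings := if List.lookup "crypto_mode" risk_profile == some "CLASSICAL" then
      findings ++ [[("type","RECOMMENDATION"),("severity","MEDIUM"),("title","Prepare PQC Migration Strategy"),
        ("description","The cryptography relies purely on classical algorithms. Based on key sizes, risk horizon is ~"
          ++ (match List.lookup "quantum_risk_horizon" risk_profile with | some v => v | none => "None")
          ++ ". Begin planning a transition to NIST-standardized PQC algorithms (e.g., FIPS 203 ML-KEM).")]]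
      else findings
    findings

-- ===== PORT B =====
-- B-side helpers: a finding constructor and find?-based dict access (first match), per Source B
def mkF (ftype severity title description : String) : List (String × String) :=
  [("type", ftype), ("severity", severity), ("title", title), ("description", description)]
def bGet? (d : List (String × String)) (k : String) : Option String :=
  (d.find? (fun p => p.1 == k)).map (·.2)
def bDict (res : List (String × List (String × String))) (k : String) : List (String × String) :=
  ((res.find? (fun p => p.1 == k)).map (·.2)).getD []
def bVer (res : List (String × List (String × String))) : String :=
  (bGet? (bDict res "tls") "version").getD "TLS 1.3"
def bLeg (v : String) : Bool := v == "TLS 1.0" || v == "TLS 1.1"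
def bStatic (res : List (String × List (String × String))) : Bool :=
  PySem.Str.isIn "Static" ((bGet? (bDict res "tls") "key_exchange").getD "")
def bChain (res : List (String × List (String × String))) : Bool :=
  bGet? (bDict res "certificate") "chain_status" == some "WEAK"
    || bGet? (bDict res "certificate") "chain_status" == some "UNTRUSTED"

def analyze_findings_alt (tls_results : List (List (String × List (String × String)))) (risk_profile : List (String × String)) : List (List (String × String)) :=
  if tls_results = [] then
    [mkF "MISCONFIG" "CRITICAL" "Unreachable Target"
      "No successful TLS connections could be established to any resolved IP address."]
  else
    let versions := tls_results.map bVer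
    -- next((v for v in reversed(versions) if legacy), "TLS 1.2" if present else "TLS 1.3")
    let worst := match versions.reverse.find? bLeg with
      | some v => v
      | none => if versions.contains "TLS 1.2" then "TLS 1.2" else "TLS 1.3"
    let rules : List (Bool × List (List (String × String))) :=
      [(bLeg worst,
        [mkF "MISCONFIG" "HIGH" "Deprecated TLS Version"
          ("The target supports " ++ worst ++ ", which is deprecated and vulnerable to legacy cryptographic attacks."),
         mkF "RECOMMENDATION" "HIGH" "Upgrade to TLS 1.3"
          "Disable support for TLS 1.0/1.1 and prioritize TLS 1.3 with strong cipher suites."]),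
       (tls_results.any bStatic,
        [mkF "MISCONFIG" "CRITICAL" "Missing Forward Secrecy"
          "Static RSA key exchange detected. This severely increases Harvest Now, Decrypt Later (HNDL) risk against future quantum computers.",
         mkF "RECOMMENDATION" "CRITICAL" "Enable ECDHE or DHE"
          "Reconfigure the server to only allow ephemeral Diffie-Hellman key exchanges to guarantee perfect forward secrecy."]),
       (tls_results.any bChain,
        [mkF "MISCONFIG" "HIGH" "Weak or Untrusted Certificate Chain"
          "The certificate chain contains untrusted roots or relies on weak legacy signing algorithms (e.g., SHA-1).",
         mkF "RECOMMENDATION" "HIGH" "Renew Certificate Chain"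
          "Replace the existing certificate with one issued by a trusted CA using SHA-256 or better."]),
       (bGet? risk_profile "crypto_mode" == some "CLASSICAL",
        [mkF "RECOMMENDATION" "MEDIUM" "Prepare PQC Migration Strategy"
          ("The cryptography relies purely on classical algorithms. Based on key sizes, risk horizon is ~"
            ++ (bGet? risk_profile "quantum_risk_horizon").getD "None"
            ++ ". Begin planning a transition to NIST-standardized PQC algorithms (e.g., FIPS 203 ML-KEM).")])]
    rules.flatMap (fun r => if r.1 then r.2 else [])

-- ===== PRECONDITION & SPEC =====
def Spec_analyze_findings (tls_results : List (List (String × List (String × String)))) (risk_profile : List (String × String)) (out : List (List (String × String))) : Prop := out = analyze_findings_alt tls_results risk_profile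
instance (tls_results : List (List (String × List (String × String)))) (risk_profile : List (String × String)) (out : List (List (String × String))) : Decidable (Spec_analyze_findings tls_results risk_profile out) := by unfold Spec_analyze_findings; infer_instance

-- ===== CLAIM =====
def Claim_equal_analyze_findings : Prop := ∀ (tls_results : List (List (String × List (String × String)))) (risk_profile : List (String × String)), Dom_analyze_findings tls_results risk_profile → Spec_analyze_findings tls_results risk_profile (analyze_findings tls_results risk_profile)

-- ===== LEMMAS AND PROOFS =====
theorem find?_map_eq_lookup {ν : Type} (k : String) (l : List (String × ν)) :
    (l.find? (fun p => p.1 == k)).map (·.2) = List.lookup k l := by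
  induction l with
  | nil => simp
  | cons x t ih =>
    by_cases h : (x.1 == k) = true
    · have : (k == x.1) = true := by rwa [Bool.beq_comm] at h
      simp [List.lookup, h, this]
    · have h' : (k == x.1) = false := by
        rw [Bool.not_eq_true] at h; rwa [Bool.beq_comm] at h
      rw [Bool.not_eq_true] at h
      simp [List.lookup, h, h', ih]

theorem bDict_eq (res : List (String × List (String × String))) (k : String) :
    bDict res k = (List.lookup k res).getD [] := by
  simp [bDict, find?_map_eq_lookup]

theorem bGet?_eq (d : List (String × String)) (k : String) :
    bGet? d k = List.lookup k d := by
  simp [bGet?, find?_map_eq_lookup]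

theorem bVer_eq (res : List (String × List (String × String))) : bVer res = aVer res := by
  simp [bVer, aVer, aTls, bDict_eq, bGet?_eq]
theorem bLeg_eq : bLeg = aLeg := rfl
theorem bStatic_eq (res : List (String × List (String × String))) : bStatic res = aStatic res := by
  simp [bStatic, aStatic, aTls, bDict_eq, bGet?_eq]
theorem bChain_eq (res : List (String × List (String × String))) : bChain res = aChain res := by
  simp [bChain, aChain, bDict_eq, bGet?_eq]

theorem aLeg_ne13 (v : String) (h : aLeg v = true) : (v == "TLS 1.3") = false := by
  have h' : v = "TLS 1.0" ∨ v = "TLS 1.1" := by simpa [aLeg] using h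
  rcases h' with h' | h' <;> subst h' <;> decide

-- last legacy version, as a left fold (A's loop shape)
def aLastLeg (l : List (List (String × List (String × String)))) : Option String :=
  l.foldl (fun acc res => if aLeg (aVer res) then some (aVer res) else acc) none

theorem aLastLeg_acc (l : List (List (String × List (String × String)))) (acc : Option String) :
    l.foldl (fun a res => if aLeg (aVer res) then some (aVer res) else a) acc
      = match aLastLeg l with | some v => some v | none => acc := by
  induction l generalizing acc with
  | nil => simp [aLastLeg]
  | cons x t ih =>
    simp only [aLastLeg, List.foldl_cons] at *
    by_cases h : aLeg (aVer x) = true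
    · simp only [h, if_pos]
      rw [ih (some (aVer x))]
      cases ht : t.foldl (fun a res => if aLeg (aVer res) then some (aVer res) else a) none <;> simp
    · rw [Bool.not_eq_true] at h
      simp only [h, Bool.false_eq_true, if_false, ih acc]

-- B's reversed-scan first match equals A's last-wins fold
theorem reverse_find?_eq_aLastLeg (l : List (List (String × List (String × String)))) :
    ((l.map aVer).reverse.find? aLeg) = aLastLeg l := by
  induction l with
  | nil => simp [aLastLeg]
  | cons x t ih =>
    have hacc : aLastLeg (x :: t)
        = match aLastLeg t with
          | some v => some v
          | none => if aLeg (aVer x) then some (aVer x) else none := by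
      simp only [aLastLeg, List.foldl_cons]
      exact aLastLeg_acc t _
    rw [hacc, ← ih]
    simp only [List.map_cons, List.reverse_cons, List.find?_append]
    cases hf : ((t.map aVer).reverse.find? aLeg) with
    | some v => simp
    | none =>
      by_cases h : aLeg (aVer x) = true
      · simp [List.find?, h]
      · rw [Bool.not_eq_true] at h
        simp [List.find?, h]

theorem aLoop (l : List (List (String × List (String × String)))) (w k : String) (s c : Bool) :
    l.foldl aStep (w, k, s, c)
      = ((match aLastLeg l with
          | some v => v
          | none => if (l.map aVer).contains "TLS 1.2" && (w == "TLS 1.3") then "TLS 1.2" else w),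
         (if l.any aPk then "CLASSICAL" else k),
         s || l.any aStatic,
         c || l.any aChain) := by
  induction l generalizing w k s c with
  | nil => simp [aLastLeg]
  | cons x t ih =>
    have hacc : aLastLeg (x :: t)
        = match aLastLeg t with
          | some v => some v
          | none => if aLeg (aVer x) then some (aVer x) else none := by
      simp only [aLastLeg, List.foldl_cons]
      exact aLastLeg_acc t _
    simp only [List.foldl_cons, List.map_cons, List.any_cons, List.contains_cons, hacc, aStep]
    rw [ih]
    simp only [Prod.mk.injEq]
    refine ⟨?_, ?_, ?_, ?_⟩
    · by_cases hx : aLeg (aVer x) = true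
      · have h13 := aLeg_ne13 _ hx
        simp only [hx, if_pos]
        cases ht : aLastLeg t <;> simp [h13]
      · rw [Bool.not_eq_true] at hx
        simp only [hx, Bool.false_eq_true, if_false]
        by_cases h12 : (aVer x == "TLS 1.2") = true
        · have hv := eq_of_beq h12
          by_cases hw : (w == "TLS 1.3") = true
          · have hw3 := eq_of_beq hw
            cases ht : aLastLeg t <;> simp [hv, hw3]
          · rw [Bool.not_eq_true] at hw
            cases ht : aLastLeg t <;> simp [hw, hv]
        · rw [Bool.not_eq_true] at h12
          have hsym : ("TLS 1.2" == aVer x) = false := by rw [Bool.beq_comm]; exact h12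
          by_cases hw : (w == "TLS 1.3") = true
          · have hw3 := eq_of_beq hw
            cases ht : aLastLeg t <;> simp [h12, hsym, hw3]
          · rw [Bool.not_eq_true] at hw
            cases ht : aLastLeg t <;> simp [h12, hsym, hw]
    · by_cases hp : aPk x = true <;> simp [hp]
    · by_cases hs : aStatic x = true <;> simp [hs]
    · by_cases hc : aChain x = true <;> simp [hc]

-- ===== VERDICT =====
theorem analyze_findings_spec : Claim_equal_analyze_findings := by
  intro tls_results risk_profile _
  unfold Spec_analyze_findings analyze_findings analyze_findings_alt
  by_cases h : tls_results = []
  · simp [h, mkF]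
  · simp only [h, if_false]
    rw [aLoop]
    have hmap : tls_results.map bVer = tls_results.map aVer := by
      exact List.map_congr_left (fun res _ => bVer_eq res)
    have hany_s : tls_results.any bStatic = tls_results.any aStatic :=
      by rw [funext bStatic_eq]
    have hany_c : tls_results.any bChain = tls_results.any aChain :=
      by rw [funext bChain_eq]
    rw [hmap, hany_s, hany_c, bLeg_eq, reverse_find?_eq_aLastLeg, bGet?_eq, bGet?_eq]
    cases hl : aLastLeg tls_results with
    | some v =>
      simp only [List.flatMap_cons, List.flatMap_nil, List.append_nil, List.nil_append]
      by_cases hleg : aLeg v = true <;>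
      by_cases hs : tls_results.any aStatic = true <;>
      by_cases hc : tls_results.any aChain = true <;>
      by_cases hm : (List.lookup "crypto_mode" risk_profile == some "CLASSICAL") = true <;>
        simp [hleg, hs, hc, hm, mkF, Option.getD]  <;>
        cases List.lookup "quantum_risk_horizon" risk_profile <;> simp
    | none =>
      simp only [List.flatMap_cons, List.flatMap_nil, List.append_nil, List.nil_append,
        beq_self_eq_true, Bool.and_true]
      by_cases hs : tls_results.any aStatic = true <;>
      by_cases hc : tls_results.any aChain = true <;>
      by_cases hm : (List.lookup "crypto_mode" risk_profile == some "CLASSICAL") = true <;>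
        simp [hs, hc, hm, aLeg, mkF, Option.getD] <;>
        cases List.lookup "quantum_risk_horizon" risk_profile <;> simp
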